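-- pv_equiv track=rewrite | github.com/MLcraft/CodeSkulptor | Tic-Tac-Toe.py | max_scores
-- ===== SOURCE A (Python) =====
-- def max_scores(scores):
--     """
--     Return list of index and value of
--     maximum scores.
--     """
--     maxscores = []
--     for idx in range(len(scores)):
--         item = scores[idx]
--         if (len(maxscores) == 0):
--             maxscores.append((idx, item))
--         elif item == maxscores[0][1]:
--             maxscores.append((idx, item))
--         elif item > maxscores[0][1]:
--             maxscores = [(idx, item)]
--     return maxscores
-- ===== SOURCE B (Python) =====
-- def max_scores(scores):
--     """
--     Return list of index and value of
--     maximum scores.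
--     """
--     if not scores:
--         return []
--     m = max(scores)
--     return [(i, v) for i, v in enumerate(scores) if v == m]
-- ===== Notes on version B (the rewrite author's own statement) =====
-- stated objective: simpler
-- what changed: Replaced A's single pass maintaining a running-max candidate list (appended on ties, reset on a new max) by a two-pass find-max-then-filter: compute max(scores) once, then one comprehension over enumerate collecting every (i, v) with v equal to the max.
import Mathlib
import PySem

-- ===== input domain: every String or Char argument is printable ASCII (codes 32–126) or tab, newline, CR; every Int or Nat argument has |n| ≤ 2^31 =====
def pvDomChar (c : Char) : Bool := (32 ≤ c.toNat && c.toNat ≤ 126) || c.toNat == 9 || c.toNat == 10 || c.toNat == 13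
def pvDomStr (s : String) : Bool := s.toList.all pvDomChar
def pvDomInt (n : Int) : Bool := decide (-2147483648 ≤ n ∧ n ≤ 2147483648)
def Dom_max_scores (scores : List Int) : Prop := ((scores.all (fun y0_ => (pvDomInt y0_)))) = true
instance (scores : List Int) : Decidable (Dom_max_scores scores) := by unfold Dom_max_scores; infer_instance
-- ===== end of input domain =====

-- B replaces A's running-max candidate list with a simpler find-max-then-filter two-pass (same cost).

-- ===== PORT A =====
-- A's loop body: one step of 'for idx in range(len(scores))' with the running candidate list.
def maxScoresStep (ms : List (Int × Int)) (p : Int × Int) : List (Int × Int) :=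
  if ms.length = 0 then ms ++ [p]
  else if p.2 = (PySem.List.pyGetD ms 0 (0, 0)).2 then ms ++ [p]
  else if p.2 > (PySem.List.pyGetD ms 0 (0, 0)).2 then [p]
  else ms

def max_scores (scores : List Int) : List (Int × Int) :=
  (PySem.List.pyRange 0 scores.length 1).foldl
    (fun ms idx =>
      let item := PySem.List.pyGetD scores idx 0  -- scores[idx]; idx generated by range(len(scores)), always in range
      maxScoresStep ms (idx, item))
    []

-- ===== PORT B =====
def max_scores_alt (scores : List Int) : List (Int × Int) :=
  match PySem.List.max? scores (fun y => y) with
  | none => []          -- if not scores: return []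
  | some m => (PySem.List.enumerate scores 0).filter (fun p => p.2 == m)

-- ===== PRECONDITION & SPEC =====
def Spec_max_scores (scores : List Int) (out : List (Int × Int)) : Prop := out = max_scores_alt scores
instance (scores : List Int) (out : List (Int × Int)) : Decidable (Spec_max_scores scores out) := by unfold Spec_max_scores; infer_instance

-- ===== CLAIM (what is proved, stated in full; the proofs are below) =====
def Claim_equal_max_scores : Prop := ∀ (scores : List Int), Dom_max_scores scores → Spec_max_scores scores (max_scores scores)

-- ===== LEMMAS AND PROOFS =====

-- A's loop over range(len(scores)) with indexing is the same fold over enumerate(scores).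
theorem max_scores_eq_foldl_enumerate (scores : List Int) :
    max_scores scores =
      (PySem.List.enumerate scores 0).foldl maxScoresStep [] := by
  rw [PySem.List.enumerate_eq_map_pyRange (d := 0), List.foldl_map]
  rfl

-- Invariant: with a nonempty accumulator whose head value is m (the max of the processed
-- prefix), the rest of A's fold keeps acc iff m stays maximal, and appends/rebuilds the
-- filtered matches of the remaining enumerated pairs.
theorem foldl_step_invariant (xs : List Int) (s m : Int) (acc : List (Int × Int))
    (hne : acc ≠ []) (hhead : (PySem.List.pyGetD acc 0 ((0 : Int), (0 : Int))).2 = m) :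
    (PySem.List.enumerate xs s).foldl maxScoresStep acc =
      (if xs.foldl max m = m then acc else []) ++
        (PySem.List.enumerate xs s).filter (fun p => p.2 == xs.foldl max m) := by
  induction xs generalizing s m acc with
  | nil => simp [PySem.List.enumerate_nil]
  | cons v rest ih =>
    obtain ⟨a, t, rfl⟩ := List.exists_cons_of_ne_nil hne
    simp only [PySem.List.pyGetD] at hhead
    norm_num at hhead
    rw [PySem.List.enumerate_cons]
    simp only [List.filter_cons, List.foldl]
    by_cases hv : v = m
    · have hstep : maxScoresStep (a :: t) (s, v) = (a :: t) ++ [(s, v)] := by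
        simp [maxScoresStep, PySem.List.pyGetD, hhead, hv]
      rw [hstep, ih (s + 1) m ((a :: t) ++ [(s, v)]) (by simp)
        (by simp [PySem.List.pyGetD, hhead])]
      have hmax : max m v = m := by omega
      simp only [hmax]
      by_cases hM : rest.foldl max m = m
      · simp [hM, hv]
      · have hmle := (PySem.List.le_foldl_max rest m).1
        have : ¬ (v == rest.foldl max m) = true := by simp; omega
        simp [hM, this]
    · by_cases hgt : v > m
      · have hstep : maxScoresStep (a :: t) (s, v) = [(s, v)] := by
          simp [maxScoresStep, PySem.List.pyGetD, hhead, hv, hgt]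
        rw [hstep, ih (s + 1) v [(s, v)] (by simp) (by simp [PySem.List.pyGetD])]
        have hmax : max m v = v := by omega
        simp only [hmax]
        have hvle := (PySem.List.le_foldl_max rest v).1
        have hMne : rest.foldl max v ≠ m := by omega
        by_cases hMv : rest.foldl max v = v
        · simp [hMv, hv]
        · simp [hMv, hMne]
          omega
      · have hlt : v < m := by omega
        have hstep : maxScoresStep (a :: t) (s, v) = a :: t := by
          simp [maxScoresStep, PySem.List.pyGetD, hhead, hv]
          omega
        rw [hstep, ih (s + 1) m (a :: t) (by simp) (by simp [PySem.List.pyGetD, hhead])]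
        have hmax : max m v = m := by omega
        simp only [hmax]
        have hmle := (PySem.List.le_foldl_max rest m).1
        have : ¬ (v == rest.foldl max m) = true := by simp; omega
        simp [this]

-- ===== VERDICT (by name: the statement is the Claim_ definition above) =====
theorem max_scores_spec : Claim_equal_max_scores := by
  intro scores _
  unfold Spec_max_scores max_scores_alt
  cases scores with
  | nil => simp [max_scores, PySem.List.pyRange, PySem.List.max?]
  | cons x rest =>
    rw [max_scores_eq_foldl_enumerate, PySem.List.max?_id_cons]
    rw [PySem.List.enumerate_cons]
    simp only [List.foldl_cons, List.filter_cons]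
    have hstep : maxScoresStep [] ((0 : Int), x) = [((0 : Int), x)] := by
      simp [maxScoresStep]
    norm_num only
    rw [hstep, foldl_step_invariant rest 1 x [((0 : Int), x)] (by simp)
      (by simp [PySem.List.pyGetD])]
    have hxle := (PySem.List.le_foldl_max rest x).1
    by_cases hM : rest.foldl max x = x
    · simp [hM]
    · have : ¬ (x == rest.foldl max x) = true := by simp; omega
      simp [hM, this]
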